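-- pv_equiv track=rewrite | github.com/herofox2024/xiayan-mcp | src/xiayan_mcp/core/publisher.py | _fix_common_encoding_issues
-- ===== SOURCE A (Python) =====
-- def _fix_common_encoding_issues(content):
--     """修复常见编码问题"""
--     # 修复常见的编码错误
--     issues = [
--         ('\\x3c', '<'),  # < 被错误编码
--         ('\\x3e', '>'),  # > 被错误编码
--         ('\\x22', '"'),  # " 被错误编码
--         ('\\x27', "'"),  # ' 被错误编码
--         ('\\x5c', '\\'),  # \ 被错误编码
--     ]
--
--     for wrong, right in issues:
--         content = content.replace(wrong, right)
--
--     return content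
-- ===== SOURCE B (Python) =====
-- _TABLE = {
--     '3c': '<',
--     '3e': '>',
--     '22': '"',
--     '27': "'",
--     '5c': '\\',
-- }
--
-- def _fix_common_encoding_issues(content):
--     """修复常见编码问题"""
--     out = []
--     i = 0
--     n = len(content)
--     while i < n:
--         if content.startswith('\\x', i):
--             ch = _TABLE.get(content[i + 2:i + 4])
--             if ch is not None:
--                 out.append(ch)
--                 i += 4
--                 continue
--         out.append(content[i])
--         i += 1
--     return ''.join(out)
-- ===== Notes on version B (the rewrite author's own statement) =====
-- stated objective: alternative
-- what changed: Five sequential full-string str.replace passes are replaced by a single left-to-right scan that, on seeing '\x', looks the next two characters up in a table and emits the decoded character, building the output in one pass.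
import Mathlib
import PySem

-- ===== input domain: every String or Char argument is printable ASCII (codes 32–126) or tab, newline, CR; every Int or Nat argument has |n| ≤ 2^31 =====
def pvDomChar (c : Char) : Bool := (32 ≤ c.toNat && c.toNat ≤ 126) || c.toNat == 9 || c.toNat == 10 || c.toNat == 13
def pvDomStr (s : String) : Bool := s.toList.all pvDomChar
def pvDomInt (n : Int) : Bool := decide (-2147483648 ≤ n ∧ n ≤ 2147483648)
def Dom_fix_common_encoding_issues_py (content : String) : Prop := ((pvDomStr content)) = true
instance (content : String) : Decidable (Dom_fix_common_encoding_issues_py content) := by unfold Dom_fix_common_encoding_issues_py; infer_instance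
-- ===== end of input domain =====

-- B replaces A's five sequential full-string replace passes by a single left-to-right
-- scan with a lookup table for the two hex characters (objective: alternative, same cost class).

-- ===== PORT A =====
-- A: content.replace(wrong, right) applied for the five pairs in order.
def fix_common_encoding_issues_py (content : String) : String :=
  let c1 := PySem.Str.replace content "\\x3c" "<"
  let c2 := PySem.Str.replace c1 "\\x3e" ">"
  let c3 := PySem.Str.replace c2 "\\x22" "\""
  let c4 := PySem.Str.replace c3 "\\x27" "'"
  PySem.Str.replace c4 "\\x5c" "\\"

-- ===== PORT B =====
-- _TABLE.get(content[i+2:i+4]) : the two characters after '\x', looked up in the table.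
def pvLookup (a b : Char) : Option Char :=
  if a = '3' ∧ b = 'c' then some '<'
  else if a = '3' ∧ b = 'e' then some '>'
  else if a = '2' ∧ b = '2' then some '"'
  else if a = '2' ∧ b = '7' then some '\''
  else if a = '5' ∧ b = 'c' then some '\\'
  else none

-- Source B's index-based while loop, as recursion over the character list: on a hit
-- ('\x' followed by a table key) emit the decoded character and skip 4 positions,
-- otherwise emit the current character and advance by 1.
def pvScan : List Char → List Char
  | [] => []
  | '\\' :: rest@('x' :: a :: b :: t) =>
    match pvLookup a b with
    | some ch => ch :: pvScan t
    | none => '\\' :: pvScan rest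
  | c :: t => c :: pvScan t

def fix_common_encoding_issues_py_alt (content : String) : String :=
  String.ofList (pvScan content.toList)

-- ===== PRECONDITION & SPEC =====
def Spec_fix_common_encoding_issues_py (content : String) (out : String) : Prop := out = fix_common_encoding_issues_py_alt content
instance (content : String) (out : String) : Decidable (Spec_fix_common_encoding_issues_py content out) := by unfold Spec_fix_common_encoding_issues_py; infer_instance

-- ===== CLAIM (what is proved, stated in full; the proofs are below) =====
def Claim_equal_fix_common_encoding_issues_py : Prop := ∀ (content : String), Dom_fix_common_encoding_issues_py content → Spec_fix_common_encoding_issues_py content (fix_common_encoding_issues_py content)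

-- ===== LEMMAS AND PROOFS =====

-- equation lemmas for pvScan (it is compiled by well-founded recursion)
theorem pvScan_nil : pvScan [] = [] := by rw [pvScan.eq_def]

theorem pvScan_bsx (a b : Char) (t : List Char) :
    pvScan ('\\' :: 'x' :: a :: b :: t) =
      match pvLookup a b with
      | some ch => ch :: pvScan t
      | none => '\\' :: pvScan ('x' :: a :: b :: t) := by
  rw [pvScan.eq_def]
  split
  next heq => cases heq
  next x a' b' tl heq =>
    rw [List.cons.injEq, List.cons.injEq, List.cons.injEq, List.cons.injEq] at heq
    obtain ⟨-, -, h1, h2, h3⟩ := heq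
    subst h1; subst h2; subst h3; rfl
  next x c' t' hno heq =>
    exfalso
    rw [List.cons.injEq] at heq
    exact hno a b t heq.1.symm heq.2.symm

theorem pvScan_cons_ne (c : Char) (t : List Char) (h : c ≠ '\\') :
    pvScan (c :: t) = c :: pvScan t := by
  rw [pvScan.eq_def]
  split
  next heq => cases heq
  next x a' b' tl heq =>
    rw [List.cons.injEq] at heq
    exact absurd heq.1 h
  next x c' t' hno heq =>
    rw [List.cons.injEq] at heq
    obtain ⟨h1, h2⟩ := heq
    subst h1; subst h2; rfl

theorem pvScan_bs (t : List Char) (h : ∀ a b t', t ≠ 'x' :: a :: b :: t') :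
    pvScan ('\\' :: t) = '\\' :: pvScan t := by
  rw [pvScan.eq_def]
  split
  next heq => cases heq
  next x a' b' tl heq =>
    rw [List.cons.injEq] at heq
    exact absurd heq.2 (h _ _ _)
  next x c' t' hno heq =>
    rw [List.cons.injEq] at heq
    obtain ⟨h1, h2⟩ := heq
    subst h2; rw [← h1]

-- Python's str.replace on lists of chars, in its natural recursive form
-- (PySem.Chars.replace.go with fuel is shown equal to it below).
def simpleRepl (old new : List Char) : List Char → List Char
  | [] => []
  | c :: t =>
    if old <+: (c :: t) then new ++ simpleRepl old new (t.drop (old.length - 1))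
    else c :: simpleRepl old new t
termination_by l => l.length
decreasing_by
  · simp only [List.length_cons, List.length_drop]; omega
  · simp

theorem simpleRepl_nil (old new : List Char) : simpleRepl old new [] = [] := by
  simp [simpleRepl]

theorem simpleRepl_pos (old new : List Char) {c : Char} {t : List Char}
    (h : old <+: (c :: t)) :
    simpleRepl old new (c :: t) = new ++ simpleRepl old new (t.drop (old.length - 1)) := by
  rw [simpleRepl, if_pos h]

theorem simpleRepl_neg (old new : List Char) {c : Char} {t : List Char}
    (h : ¬ old <+: (c :: t)) :
    simpleRepl old new (c :: t) = c :: simpleRepl old new t := by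
  rw [simpleRepl, if_neg h]

theorem go_eq_simpleRepl (old new : List Char) (hold : old ≠ []) :
    ∀ (fuel : Nat) (l acc : List Char), l.length ≤ fuel →
      PySem.Chars.replace.go old new fuel l acc = acc.reverse ++ simpleRepl old new l := by
  intro fuel
  induction fuel with
  | zero =>
    intro l acc h
    have hl : l = [] := by cases l with
      | nil => rfl
      | cons c t => simp at h
    subst hl
    rw [PySem.Chars.replace.go.eq_def]
    simp [simpleRepl_nil]
  | succ n ih =>
    intro l acc h
    cases l with
    | nil =>
      rw [PySem.Chars.replace.go.eq_def]
      simp [simpleRepl_nil]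
    | cons c t =>
      rw [PySem.Chars.replace.go.eq_def]
      by_cases hp : old <+: (c :: t)
      · have hb : old.isPrefixOf (c :: t) = true := List.isPrefixOf_iff_prefix.mpr hp
        simp only [hb, if_true]
        obtain ⟨o, os, rfl⟩ : ∃ o os, old = o :: os := by
          cases old with
          | nil => exact absurd rfl hold
          | cons o os => exact ⟨o, os, rfl⟩
        have hlen : (List.drop (o :: os).length (c :: t)).length ≤ n := by
          simp only [List.length_drop, List.length_cons] at *
          omega
        rw [ih _ _ hlen, simpleRepl_pos _ new hp]
        simp [List.drop_succ_cons]
      · have hb : old.isPrefixOf (c :: t) = false := by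
          rw [← Bool.not_eq_true, List.isPrefixOf_iff_prefix]; exact hp
        simp only [hb, Bool.false_eq_true, if_false]
        have hlen : t.length ≤ n := by simp at h; omega
        rw [ih _ _ hlen, simpleRepl_neg _ new hp]
        simp

theorem replace_eq_simpleRepl (old new l : List Char) (hold : old ≠ []) :
    PySem.Chars.replace l old new = simpleRepl old new l := by
  unfold PySem.Chars.replace
  rw [if_neg (by simpa [List.isEmpty_iff] using hold)]
  rw [go_eq_simpleRepl old new hold l.length l [] le_rfl]
  simp

-- a prefix of the output not containing the replacement character was already a prefix of the input
theorem refl_prefix (old : List Char) (r : Char) :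
    ∀ (l q : List Char), r ∉ q → q <+: simpleRepl old [r] l → q <+: l := by
  intro l
  induction l with
  | nil =>
    intro q hr h
    rw [simpleRepl_nil] at h
    rw [List.prefix_nil] at h
    subst h; exact List.nil_prefix
  | cons c t ih =>
    intro q hr h
    by_cases hp : old <+: (c :: t)
    · rw [simpleRepl_pos old [r] hp] at h
      cases q with
      | nil => exact List.nil_prefix
      | cons a q' =>
        rw [List.cons_append, List.nil_append, List.cons_prefix_cons] at h
        exact absurd (h.1 ▸ List.mem_cons_self) hr
    · rw [simpleRepl_neg old [r] hp] at h
      cases q with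
      | nil => exact List.nil_prefix
      | cons a q' =>
        rw [List.cons_prefix_cons] at h
        obtain ⟨rfl, h2⟩ := h
        exact List.cons_prefix_cons.mpr ⟨rfl, ih q' (fun m => hr (List.mem_cons_of_mem _ m)) h2⟩

-- a pass whose pattern head differs from the current character steps over it
theorem passthru (o c : Char) (os new Z : List Char) (h : c ≠ o) :
    simpleRepl (o :: os) new (c :: Z) = c :: simpleRepl (o :: os) new Z :=
  simpleRepl_neg _ _ (by rw [List.cons_prefix_cons]; rintro ⟨e, -⟩; exact h e.symm)

-- a pass whose pattern matches nowhere in the next four characters steps over all four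
theorem walk4 (old new : List Char) (c1 c2 c3 c4 : Char) (X : List Char)
    (h1 : ¬ old <+: (c1 :: c2 :: c3 :: c4 :: X)) (h2 : ¬ old <+: (c2 :: c3 :: c4 :: X))
    (h3 : ¬ old <+: (c3 :: c4 :: X)) (h4 : ¬ old <+: (c4 :: X)) :
    simpleRepl old new (c1 :: c2 :: c3 :: c4 :: X) = c1 :: c2 :: c3 :: c4 :: simpleRepl old new X := by
  rw [simpleRepl_neg _ _ h1, simpleRepl_neg _ _ h2, simpleRepl_neg _ _ h3, simpleRepl_neg _ _ h4]

-- a pass whose pattern starts the string fires and continues after the match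
theorem hit4 (c1 c2 c3 c4 : Char) (new X : List Char) :
    simpleRepl [c1, c2, c3, c4] new (c1 :: c2 :: c3 :: c4 :: X) =
      new ++ simpleRepl [c1, c2, c3, c4] new X := by
  rw [simpleRepl_pos _ _ (by simp [List.cons_prefix_cons])]
  rfl

-- the composition of A's five replace passes
def pvComp (l : List Char) : List Char :=
  simpleRepl ['\\','x','5','c'] ['\\']
    (simpleRepl ['\\','x','2','7'] ['\'']
      (simpleRepl ['\\','x','2','2'] ['"']
        (simpleRepl ['\\','x','3','e'] ['>']
          (simpleRepl ['\\','x','3','c'] ['<'] l))))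

theorem comp_cons_ne (c : Char) (t : List Char) (hc : c ≠ '\\') :
    pvComp (c :: t) = c :: pvComp t := by
  unfold pvComp
  rw [passthru _ _ _ _ _ hc, passthru _ _ _ _ _ hc, passthru _ _ _ _ _ hc,
      passthru _ _ _ _ _ hc, passthru _ _ _ _ _ hc]

theorem comp_hit_3c (X : List Char) : pvComp ('\\' :: 'x' :: '3' :: 'c' :: X) = '<' :: pvComp X := by
  unfold pvComp
  rw [hit4 '\\' 'x' '3' 'c' ['<'] X]
  simp only [List.cons_append, List.nil_append]
  rw [passthru _ _ _ _ _ (by decide), passthru _ _ _ _ _ (by decide),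
      passthru _ _ _ _ _ (by decide), passthru _ _ _ _ _ (by decide)]

theorem comp_hit_3e (X : List Char) : pvComp ('\\' :: 'x' :: '3' :: 'e' :: X) = '>' :: pvComp X := by
  unfold pvComp
  rw [walk4 ['\\','x','3','c'] ['<'] '\\' 'x' '3' 'e' X (by simp [List.cons_prefix_cons])
    (by simp [List.cons_prefix_cons]) (by simp [List.cons_prefix_cons]) (by simp [List.cons_prefix_cons])]
  rw [hit4 '\\' 'x' '3' 'e' ['>'] _]
  simp only [List.cons_append, List.nil_append]
  rw [passthru _ _ _ _ _ (by decide), passthru _ _ _ _ _ (by decide),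
      passthru _ _ _ _ _ (by decide)]

theorem comp_hit_22 (X : List Char) : pvComp ('\\' :: 'x' :: '2' :: '2' :: X) = '"' :: pvComp X := by
  unfold pvComp
  rw [walk4 ['\\','x','3','c'] ['<'] '\\' 'x' '2' '2' X (by simp [List.cons_prefix_cons])
    (by simp [List.cons_prefix_cons]) (by simp [List.cons_prefix_cons]) (by simp [List.cons_prefix_cons])]
  rw [walk4 ['\\','x','3','e'] ['>'] '\\' 'x' '2' '2' _ (by simp [List.cons_prefix_cons])
    (by simp [List.cons_prefix_cons]) (by simp [List.cons_prefix_cons]) (by simp [List.cons_prefix_cons])]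
  rw [hit4 '\\' 'x' '2' '2' ['"'] _]
  simp only [List.cons_append, List.nil_append]
  rw [passthru _ _ _ _ _ (by decide), passthru _ _ _ _ _ (by decide)]

theorem comp_hit_27 (X : List Char) : pvComp ('\\' :: 'x' :: '2' :: '7' :: X) = '\'' :: pvComp X := by
  unfold pvComp
  rw [walk4 ['\\','x','3','c'] ['<'] '\\' 'x' '2' '7' X (by simp [List.cons_prefix_cons])
    (by simp [List.cons_prefix_cons]) (by simp [List.cons_prefix_cons]) (by simp [List.cons_prefix_cons])]
  rw [walk4 ['\\','x','3','e'] ['>'] '\\' 'x' '2' '7' _ (by simp [List.cons_prefix_cons])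
    (by simp [List.cons_prefix_cons]) (by simp [List.cons_prefix_cons]) (by simp [List.cons_prefix_cons])]
  rw [walk4 ['\\','x','2','2'] ['"'] '\\' 'x' '2' '7' _ (by simp [List.cons_prefix_cons])
    (by simp [List.cons_prefix_cons]) (by simp [List.cons_prefix_cons]) (by simp [List.cons_prefix_cons])]
  rw [hit4 '\\' 'x' '2' '7' ['\''] _]
  simp only [List.cons_append, List.nil_append]
  rw [passthru _ _ _ _ _ (by decide)]

theorem comp_hit_5c (X : List Char) : pvComp ('\\' :: 'x' :: '5' :: 'c' :: X) = '\\' :: pvComp X := by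
  unfold pvComp
  rw [walk4 ['\\','x','3','c'] ['<'] '\\' 'x' '5' 'c' X (by simp [List.cons_prefix_cons])
    (by simp [List.cons_prefix_cons]) (by simp [List.cons_prefix_cons]) (by simp [List.cons_prefix_cons])]
  rw [walk4 ['\\','x','3','e'] ['>'] '\\' 'x' '5' 'c' _ (by simp [List.cons_prefix_cons])
    (by simp [List.cons_prefix_cons]) (by simp [List.cons_prefix_cons]) (by simp [List.cons_prefix_cons])]
  rw [walk4 ['\\','x','2','2'] ['"'] '\\' 'x' '5' 'c' _ (by simp [List.cons_prefix_cons])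
    (by simp [List.cons_prefix_cons]) (by simp [List.cons_prefix_cons]) (by simp [List.cons_prefix_cons])]
  rw [walk4 ['\\','x','2','7'] ['\''] '\\' 'x' '5' 'c' _ (by simp [List.cons_prefix_cons])
    (by simp [List.cons_prefix_cons]) (by simp [List.cons_prefix_cons]) (by simp [List.cons_prefix_cons])]
  rw [hit4 '\\' 'x' '5' 'c' ['\\'] _]
  simp only [List.cons_append, List.nil_append]

-- a backslash not followed by any of the five sequences walks through all five passes:
-- the replacement characters of the earlier passes never occur inside a pattern, so
-- refl_prefix carries "no pattern tail is a prefix of t" through the composition.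
theorem comp_bs (t : List Char)
    (h1 : ¬ (['x','3','c'] <+: t)) (h2 : ¬ (['x','3','e'] <+: t))
    (h3 : ¬ (['x','2','2'] <+: t)) (h4 : ¬ (['x','2','7'] <+: t))
    (h5 : ¬ (['x','5','c'] <+: t)) :
    pvComp ('\\' :: t) = '\\' :: pvComp t := by
  unfold pvComp
  rw [simpleRepl_neg _ _ (by rw [List.cons_prefix_cons]; rintro ⟨-, h⟩; exact h1 h)]
  rw [simpleRepl_neg _ _ (by
    rw [List.cons_prefix_cons]; rintro ⟨-, h⟩
    exact h2 (refl_prefix _ '<' _ _ (by decide) h))]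
  rw [simpleRepl_neg _ _ (by
    rw [List.cons_prefix_cons]; rintro ⟨-, h⟩
    exact h3 (refl_prefix _ '<' _ _ (by decide)
      (refl_prefix _ '>' _ _ (by decide) h)))]
  rw [simpleRepl_neg _ _ (by
    rw [List.cons_prefix_cons]; rintro ⟨-, h⟩
    exact h4 (refl_prefix _ '<' _ _ (by decide)
      (refl_prefix _ '>' _ _ (by decide)
        (refl_prefix _ '"' _ _ (by decide) h))))]
  rw [simpleRepl_neg _ _ (by
    rw [List.cons_prefix_cons]; rintro ⟨-, h⟩
    exact h5 (refl_prefix _ '<' _ _ (by decide)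
      (refl_prefix _ '>' _ _ (by decide)
        (refl_prefix _ '"' _ _ (by decide)
          (refl_prefix _ '\'' _ _ (by decide) h)))))]

theorem comp_eq_scan : ∀ (n : Nat) (l : List Char), l.length ≤ n → pvComp l = pvScan l := by
  intro n
  induction n with
  | zero =>
    intro l h
    have : l = [] := by cases l with
      | nil => rfl
      | cons c t => simp at h
    subst this
    rw [pvScan_nil]
    simp [pvComp, simpleRepl_nil]
  | succ n ih =>
    intro l h
    cases l with
    | nil =>
      rw [pvScan_nil]
      simp [pvComp, simpleRepl_nil]
    | cons c t =>
      by_cases hc : c = '\\'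
      · subst hc
        cases t with
        | nil =>
          rw [comp_bs [] (by simp) (by simp) (by simp) (by simp) (by simp),
              ih [] (by simp), pvScan_bs [] (by simp)]
        | cons u t1 =>
          by_cases hu : u = 'x'
          · subst hu
            cases t1 with
            | nil =>
              rw [comp_bs ['x'] (by simp [List.cons_prefix_cons])
                (by simp [List.cons_prefix_cons]) (by simp [List.cons_prefix_cons])
                (by simp [List.cons_prefix_cons]) (by simp [List.cons_prefix_cons])]
              rw [ih ['x'] (by simp at h ⊢; omega), pvScan_bs ['x'] (by simp)]
            | cons a t2 =>
              cases t2 with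
              | nil =>
                rw [comp_bs ['x', a] (by simp [List.cons_prefix_cons])
                  (by simp [List.cons_prefix_cons]) (by simp [List.cons_prefix_cons])
                  (by simp [List.cons_prefix_cons]) (by simp [List.cons_prefix_cons])]
                rw [ih ['x', a] (by simp at h ⊢; omega), pvScan_bs ['x', a] (by simp)]
              | cons b t3 =>
                by_cases g1 : a = '3' ∧ b = 'c'
                · obtain ⟨rfl, rfl⟩ := g1
                  rw [comp_hit_3c, ih t3 (by simp at h ⊢; omega), pvScan_bsx,
                      show pvLookup '3' 'c' = some '<' from rfl]
                by_cases g2 : a = '3' ∧ b = 'e'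
                · obtain ⟨rfl, rfl⟩ := g2
                  rw [comp_hit_3e, ih t3 (by simp at h ⊢; omega), pvScan_bsx,
                      show pvLookup '3' 'e' = some '>' from rfl]
                by_cases g3 : a = '2' ∧ b = '2'
                · obtain ⟨rfl, rfl⟩ := g3
                  rw [comp_hit_22, ih t3 (by simp at h ⊢; omega), pvScan_bsx,
                      show pvLookup '2' '2' = some '"' from rfl]
                by_cases g4 : a = '2' ∧ b = '7'
                · obtain ⟨rfl, rfl⟩ := g4
                  rw [comp_hit_27, ih t3 (by simp at h ⊢; omega), pvScan_bsx,
                      show pvLookup '2' '7' = some '\'' from rfl]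
                by_cases g5 : a = '5' ∧ b = 'c'
                · obtain ⟨rfl, rfl⟩ := g5
                  rw [comp_hit_5c, ih t3 (by simp at h ⊢; omega), pvScan_bsx,
                      show pvLookup '5' 'c' = some '\\' from rfl]
                have hnone : pvLookup a b = none := by
                  rw [pvLookup, if_neg g1, if_neg g2, if_neg g3, if_neg g4, if_neg g5]
                have hpre : ∀ (d1 d2 : Char), ¬ (a = d1 ∧ b = d2) →
                    ¬ (['x', d1, d2] <+: ('x' :: a :: b :: t3)) := by
                  intro d1 d2 hne hp
                  rw [List.cons_prefix_cons, List.cons_prefix_cons, List.cons_prefix_cons] at hp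
                  exact hne ⟨hp.2.1.symm, hp.2.2.1.symm⟩
                rw [comp_bs _ (hpre '3' 'c' g1) (hpre '3' 'e' g2) (hpre '2' '2' g3)
                  (hpre '2' '7' g4) (hpre '5' 'c' g5)]
                rw [ih ('x' :: a :: b :: t3) (by simp at h ⊢; omega)]
                rw [pvScan_bsx a b t3, hnone]
          · rw [comp_bs (u :: t1)
              (by rw [List.cons_prefix_cons]; rintro ⟨e, -⟩; exact hu e.symm)
              (by rw [List.cons_prefix_cons]; rintro ⟨e, -⟩; exact hu e.symm)
              (by rw [List.cons_prefix_cons]; rintro ⟨e, -⟩; exact hu e.symm)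
              (by rw [List.cons_prefix_cons]; rintro ⟨e, -⟩; exact hu e.symm)
              (by rw [List.cons_prefix_cons]; rintro ⟨e, -⟩; exact hu e.symm)]
            rw [ih (u :: t1) (by simp at h ⊢; omega)]
            rw [pvScan_bs (u :: t1) (by intro a' b' t' he; rw [List.cons.injEq] at he; exact hu he.1)]
      · rw [comp_cons_ne c t hc, ih t (by simp at h ⊢; omega), pvScan_cons_ne c t hc]

theorem portA_eq (content : String) :
    fix_common_encoding_issues_py content = String.ofList (pvComp content.toList) := by
  unfold fix_common_encoding_issues_py
  show String.ofList (PySem.Chars.replace _ _ _) = _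
  refine congrArg String.ofList ?_
  have e1 : ("\\x3c" : String).toList = ['\\','x','3','c'] := by decide
  have e2 : ("\\x3e" : String).toList = ['\\','x','3','e'] := by decide
  have e3 : ("\\x22" : String).toList = ['\\','x','2','2'] := by decide
  have e4 : ("\\x27" : String).toList = ['\\','x','2','7'] := by decide
  have e5 : ("\\x5c" : String).toList = ['\\','x','5','c'] := by decide
  have f1 : ("<" : String).toList = ['<'] := by decide
  have f2 : (">" : String).toList = ['>'] := by decide
  have f3 : ("\"" : String).toList = ['"'] := by decide
  have f4 : ("'" : String).toList = ['\''] := by decide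
  have f5 : ("\\" : String).toList = ['\\'] := by decide
  simp only [PySem.Str.replace, String.toList_ofList, e1, e2, e3, e4, e5, f1, f2, f3, f4, f5]
  rw [replace_eq_simpleRepl _ _ _ (by simp), replace_eq_simpleRepl _ _ _ (by simp),
      replace_eq_simpleRepl _ _ _ (by simp), replace_eq_simpleRepl _ _ _ (by simp),
      replace_eq_simpleRepl _ _ _ (by simp)]
  rfl

-- ===== VERDICT (by name: the statement is the Claim_ definition above) =====
theorem fix_common_encoding_issues_py_spec : Claim_equal_fix_common_encoding_issues_py := by
  intro content _
  show fix_common_encoding_issues_py content = fix_common_encoding_issues_py_alt content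
  rw [portA_eq, fix_common_encoding_issues_py_alt,
      comp_eq_scan content.toList.length content.toList le_rfl]
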